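-- pv_equiv track=rewrite | github.com/kylebebak/python-exercises | euler/_230_fibonacci_words.py | char_at_index
-- ===== SOURCE A (Python) =====
-- def fib_until(cutoff, n0=0, n1=1):
--     """
--     Returns the fibonacci sequence until a term
--     is >= the cutoff value.
--
--     >>> fib_until(20, 0, 1)
--     [0, 1, 1, 2, 3, 5, 8, 13, 21]
--     """
--     seq = [n0, n1]
--     while True:
--         if n1 >= cutoff:
--             return seq
--         n0, n1 = n1, n0+n1
--         seq.append(n1)
--
-- def char_at_index(D, w0, w1):
--     """
--     Finds char at the index specified, given that w0 and
--     w1 are the starting strings in the fibonacci "string"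
--     sequence. Uses the length of the input strings to work
--     backwards and find the index of the character in one of
--     the input strings that would have to occupy the index D
--     in the fibonacci string. Can handle huge values of D.
--     Assumes the string has only been built up only to the
--     minimum size required to contain the specified index D.
--
--     >>> char_at_index(35, "1415926535", "8979323846")
--     '9'
--
--     >>> char_at_index(20.5, "dog", "house")
--     Traceback (most recent call last):
--         ...
--     TypeError: The char index must be a positive integer.
--
--     >>> char_at_index(-1, "dog", "house")
--     Traceback (most recent call last):
--         ...
--     TypeError: The char index must be a positive integer.
--     """
--     if not isinstance(D, int) or D < 1:
--         raise TypeError('The char index must be a positive integer.')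
--     if not isinstance(w0, str) or not isinstance(w1, str):
--         raise TypeError('The starting terms must be strings.')
--
--     # reverse fibonacci sequence
--     indices = list(reversed(
--         fib_until(D, len(w0), len(w1))
--     ))
--     L = len(indices)
--
--     i = 0
--     # work backwards towards string and index of original char
--     while i < L-2:
--         if D > indices[i+2]:
--         # char came from previous word
--             D -= indices[i+2]
--         else:
--         # char came from word before previous word
--             i += 1
--         i += 1
--     w = w0 if L-1-i == 0 else w1
--     return w[D-1]
-- ===== SOURCE B (Python) =====
-- def fib_until(cutoff, n0=0, n1=1):
--     """Fibonacci sequence starting n0, n1 until a term is >= cutoff."""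
--     seq = [n0, n1]
--     while True:
--         if n1 >= cutoff:
--             return seq
--         n0, n1 = n1, n0+n1
--         seq.append(n1)
--
-- def char_at_index(D, w0, w1):
--     """Char at 1-based index D of the Fibonacci word built from w0, w1,
--     by recursion over the nested structure: the level-n word is the
--     level-(n-2) word followed by the level-(n-1) word."""
--     if not isinstance(D, int) or D < 1:
--         raise TypeError('The char index must be a positive integer.')
--     if not isinstance(w0, str) or not isinstance(w1, str):
--         raise TypeError('The starting terms must be strings.')
--     L = fib_until(D, len(w0), len(w1))
--
--     def ca(n, d):
--         if n == 0:
--             return w0[d-1]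
--         if n == 1:
--             return w1[d-1]
--         if d <= L[n-2]:
--             return ca(n-2, d)          # char lies in the left (older) part
--         return ca(n-1, d - L[n-2])     # char lies in the right part
--
--     return ca(len(L)-1, D)
-- ===== Notes on version B (the rewrite author's own statement) =====
-- stated objective: alternative
-- what changed: Replaces A's backward index-cursor while-loop over the reversed length list by direct recursion over the nested Fibonacci-word structure (left part -> level n-2, right part -> level n-1 with the offset subtracted), using the forward length list.
import Mathlib
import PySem

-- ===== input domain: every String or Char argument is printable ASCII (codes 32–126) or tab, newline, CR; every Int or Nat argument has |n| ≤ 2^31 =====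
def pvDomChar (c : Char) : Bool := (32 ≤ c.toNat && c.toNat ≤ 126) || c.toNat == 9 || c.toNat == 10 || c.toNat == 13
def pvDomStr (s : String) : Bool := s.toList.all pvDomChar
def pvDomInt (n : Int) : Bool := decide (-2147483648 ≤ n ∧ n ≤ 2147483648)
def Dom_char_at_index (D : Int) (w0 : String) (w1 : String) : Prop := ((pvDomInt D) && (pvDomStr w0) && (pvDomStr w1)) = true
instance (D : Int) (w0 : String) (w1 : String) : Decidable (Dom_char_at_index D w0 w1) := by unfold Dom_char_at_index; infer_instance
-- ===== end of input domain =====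

-- B replaces A's backward index-cursor while-loop over the reversed length list by direct
-- recursion over the nested Fibonacci-word structure (objective: alternative decomposition).

-- ===== PORT A =====
-- shared helper fib_until (identical in Source A and Source B); the Python 'while True' loop is
-- given a fuel bound that is never reached on inputs satisfying Pre_ (the loop stops as
-- soon as n1 ≥ cutoff, within at most cutoff + 2 iterations unless both seeds are 0,
-- which Pre_ excludes since the Python loop diverges there).
def fibUntilLoop (fuel : Nat) (cutoff n0 n1 : Int) (seq : List Int) : List Int :=
  match fuel with
  | 0 => seq
  | fuel + 1 =>
      if n1 ≥ cutoff then seq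
      else fibUntilLoop fuel cutoff n1 (n0 + n1) (seq ++ [n0 + n1])

def fib_until (cutoff n0 n1 : Int) : List Int :=
  fibUntilLoop (cutoff.toNat + 4) cutoff n0 n1 [n0, n1]

-- Python 'w[D-1]' producing a one-char string (IndexError → "" ; unreachable under Pre_)
def getChar1 (w : String) (idx : Int) : String :=
  ((PySem.Str.pyGet? w idx).map (fun c => String.ofList [c])).getD ""

-- A's while-loop over mutable (i, D); indices[i+2] is always in range when reached
def aLoop (indices : List Int) (L : Int) (i D : Int) : Int × Int :=
  if _h : i < L - 2 then
    let v := (PySem.List.pyGet? indices (i + 2)).getD 0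
    if D > v then aLoop indices L (i + 1) (D - v)
    else aLoop indices L (i + 2) D
  else (D, i)
termination_by (L - 2 - i).toNat
decreasing_by all_goals omega

def char_at_index (D : Int) (w0 : String) (w1 : String) : String :=
  if D < 1 then ""   -- Python: raise TypeError (excluded by Pre_)
  else
    let indices := (fib_until D (PySem.Str.len w0) (PySem.Str.len w1)).reverse
    let L : Int := indices.length
    let r := aLoop indices L 0 D
    let w := if L - 1 - r.2 = 0 then w0 else w1
    getChar1 w (r.1 - 1)

-- ===== PORT B =====
-- ca(n, d): recursion over the level n of the nested Fibonacci word; the Python level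
-- index n is a nonnegative int, ported as Nat (recursion to n-2 and n-1)
def caRec (L : List Int) (w0 w1 : String) (n : Nat) (d : Int) : String :=
  match n with
  | 0 => getChar1 w0 (d - 1)
  | 1 => getChar1 w1 (d - 1)
  | m + 2 =>
      let t := (PySem.List.pyGet? L (m : Int)).getD 0  -- L[n-2], always in range when reached
      if d ≤ t then caRec L w0 w1 m d
      else caRec L w0 w1 (m + 1) (d - t)

def char_at_index_alt (D : Int) (w0 : String) (w1 : String) : String :=
  if D < 1 then ""   -- Python: raise TypeError (excluded by Pre_)
  else
    let L := fib_until D (PySem.Str.len w0) (PySem.Str.len w1)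
    caRec L w0 w1 (L.length - 1) D

-- ===== PRECONDITION & SPEC =====
-- Pre_ excludes D < 1 (Python A raises TypeError) and the case where both starting
-- words are empty (A's fib_until loop then never terminates).
def Pre_char_at_index (D : Int) (w0 : String) (w1 : String) : Prop :=
  1 ≤ D ∧ (w0 ≠ "" ∨ w1 ≠ "")
instance (D : Int) (w0 : String) (w1 : String) : Decidable (Pre_char_at_index D w0 w1) := by
  unfold Pre_char_at_index; infer_instance

def pvWitness_char_at_index : Int × String × String := (35, "1415926535", "8979323846")

def Spec_char_at_index (D : Int) (w0 : String) (w1 : String) (out : String) : Prop := out = char_at_index_alt D w0 w1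
instance (D : Int) (w0 : String) (w1 : String) (out : String) : Decidable (Spec_char_at_index D w0 w1 out) := by unfold Spec_char_at_index; infer_instance

-- ===== CLAIM (what is proved, stated in full; the proofs are below) =====
def Claim_equal_char_at_index : Prop := ∀ (D : Int) (w0 : String) (w1 : String), Dom_char_at_index D w0 w1 → Pre_char_at_index D w0 w1 → Spec_char_at_index D w0 w1 (char_at_index D w0 w1)

-- ===== LEMMAS AND PROOFS =====

lemma fibUntilLoop_len_ge (fuel : Nat) (cutoff n0 n1 : Int) (seq : List Int) :
    seq.length ≤ (fibUntilLoop fuel cutoff n0 n1 seq).length := by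
  induction fuel generalizing n0 n1 seq with
  | zero => simp [fibUntilLoop]
  | succ f ih =>
      simp only [fibUntilLoop]
      split
      · exact le_rfl
      · exact le_trans (by simp) (ih n1 (n0 + n1) (seq ++ [n0 + n1]))

lemma fib_until_len (cutoff n0 n1 : Int) : 2 ≤ (fib_until cutoff n0 n1).length := by
  have := fibUntilLoop_len_ge (cutoff.toNat + 4) cutoff n0 n1 [n0, n1]
  simpa [fib_until] using this

-- the core correspondence: A's backward cursor at i = |seq| - 1 - n computes exactly
-- B's recursive descent from level n
lemma walk (seq : List Int) (w0 w1 : String) (n : Nat) (d : Int)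
    (hn : n + 1 ≤ seq.length) :
    (getChar1
      (if (seq.length : Int) - 1 - (aLoop seq.reverse (seq.length : Int) ((seq.length : Int) - 1 - (n : Int)) d).2 = 0
        then w0 else w1)
      ((aLoop seq.reverse (seq.length : Int) ((seq.length : Int) - 1 - (n : Int)) d).1 - 1))
    = caRec seq w0 w1 n d := by
  induction n using Nat.strong_induction_on generalizing d with
  | _ n ih =>
    rcases n with - | (- | m)
    · have hc : ¬ ((seq.length : Int) - 1 - ((0 : Nat) : Int) < (seq.length : Int) - 2) := by
        push_cast; omega
      rw [aLoop, dif_neg hc]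
      simp [caRec]
    · have hc : ¬ ((seq.length : Int) - 1 - ((1 : Nat) : Int) < (seq.length : Int) - 2) := by
        push_cast; omega
      rw [aLoop, dif_neg hc]
      have h1 : (seq.length : Int) - 1 - ((seq.length : Int) - 1 - ((1 : Nat) : Int)) ≠ 0 := by
        push_cast; omega
      rw [if_neg h1]
      simp [caRec]
    · have hm : m < seq.length := by omega
      have hc : (seq.length : Int) - 1 - ((m + 1 + 1 : Nat) : Int) < (seq.length : Int) - 2 := by
        push_cast; omega
      have hidx : (PySem.List.pyGet? seq.reverse (((seq.length : Int) - 1 - ((m + 1 + 1 : Nat) : Int)) + 2)).getD 0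
          = (PySem.List.pyGet? seq (m : Int)).getD 0 := by
        have e1 : ((seq.length : Int) - 1 - ((m + 1 + 1 : Nat) : Int)) + 2
            = ((seq.length - 1 - m : Nat) : Int) := by push_cast; omega
        rw [e1, PySem.List.pyGet?_natCast, PySem.List.pyGet?_natCast]
        rw [List.getElem?_reverse (by omega)]
        have e3 : seq.length - 1 - (seq.length - 1 - m) = m := by omega
        rw [e3]
      rw [aLoop, dif_pos hc]
      simp only [hidx]
      rw [caRec]
      by_cases hd : d ≤ (PySem.List.pyGet? seq (m : Int)).getD 0
      · rw [if_neg (not_lt.mpr hd), if_pos hd]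
        have e2 : (seq.length : Int) - 1 - ((m + 1 + 1 : Nat) : Int) + 2
            = (seq.length : Int) - 1 - (m : Int) := by push_cast; ring
        rw [e2]
        exact ih m (by omega) d (by omega)
      · rw [if_pos (not_le.mp hd), if_neg hd]
        have e2 : (seq.length : Int) - 1 - ((m + 1 + 1 : Nat) : Int) + 1
            = (seq.length : Int) - 1 - ((m + 1 : Nat) : Int) := by push_cast; ring
        rw [e2]
        exact ih (m + 1) (by omega) (d - (PySem.List.pyGet? seq (m : Int)).getD 0) (by omega)

-- ===== VERDICT (by name: the statement is the Claim_ definition above) =====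
theorem char_at_index_spec : Claim_equal_char_at_index := by
  intro D w0 w1 _hDom hPre
  obtain ⟨hD, _⟩ := hPre
  unfold Spec_char_at_index char_at_index char_at_index_alt
  rw [if_neg (by omega), if_neg (by omega)]
  set seq := fib_until D (PySem.Str.len w0) (PySem.Str.len w1) with hseq
  have hL : 2 ≤ seq.length := fib_until_len _ _ _
  have h0 : (seq.length : Int) - 1 - ((seq.length - 1 : Nat) : Int) = 0 := by
    push_cast [Nat.cast_sub (by omega : 1 ≤ seq.length)]; ring
  have hw := walk seq w0 w1 (seq.length - 1) D (by omega)
  rw [h0] at hw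
  simp only [List.length_reverse]
  exact hw
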